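-- pv_equiv track=rewrite | github.com/Zywia/RetinaNet | utilities/dataset.py | receptiveField
-- ===== SOURCE A (Python) =====
-- def receptiveField(level):
--   receptive_field = 1
--   jump = 1
--   kernel_size = 3
--   stride = 2
--   for x in range(level):
--     receptive_field += (kernel_size - 1) * jump
--     jump *= stride
--
--   return receptive_field
-- ===== SOURCE B (Python) =====
-- def receptiveField(level):
--   # closed form: receptive field at level L is 2^(L+1) - 1 (and 1 for negative L, where the loop body never runs)
--   n = max(level, 0)
--   return 2 ** (n + 1) - 1
-- ===== Notes on version B (the rewrite author's own statement) =====
-- stated objective: faster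
-- what changed: replaced the O(level) accumulation loop (receptive_field += 2*jump; jump *= 2) by the closed form 2^(level+1) - 1
import Mathlib
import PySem

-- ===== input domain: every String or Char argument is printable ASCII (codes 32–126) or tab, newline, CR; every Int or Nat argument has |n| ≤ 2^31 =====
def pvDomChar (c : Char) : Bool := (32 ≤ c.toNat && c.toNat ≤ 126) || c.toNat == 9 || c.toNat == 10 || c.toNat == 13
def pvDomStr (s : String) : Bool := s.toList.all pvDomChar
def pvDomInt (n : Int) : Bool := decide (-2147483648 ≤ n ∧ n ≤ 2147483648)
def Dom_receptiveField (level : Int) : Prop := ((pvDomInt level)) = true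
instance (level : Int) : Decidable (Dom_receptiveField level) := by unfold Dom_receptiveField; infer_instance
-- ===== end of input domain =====

-- B replaces A's O(level) accumulation loop by the closed form 2^(level+1) - 1 (objective: faster).

-- ===== PORT A =====
-- literal port: loop over range(level) carrying (receptive_field, jump); kernel_size = 3, stride = 2
def receptiveField (level : Int) : Int :=
  let kernel_size : Int := 3
  let stride : Int := 2
  let st := (PySem.List.pyRange 0 level 1).foldl
    (fun (s : Int × Int) _ => (s.1 + (kernel_size - 1) * s.2, s.2 * stride)) (1, 1)
  st.1

-- ===== PORT B =====
def receptiveField_alt (level : Int) : Int :=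
  let n : Int := max level 0
  2 ^ (n.toNat + 1) - 1

-- ===== PRECONDITION & SPEC =====
def Spec_receptiveField (level : Int) (out : Int) : Prop := out = receptiveField_alt level
instance (level : Int) (out : Int) : Decidable (Spec_receptiveField level out) := by unfold Spec_receptiveField; infer_instance

-- ===== CLAIM (what is proved, stated in full; the proofs are below) =====
def Claim_equal_receptiveField : Prop := ∀ (level : Int), Dom_receptiveField level → Spec_receptiveField level (receptiveField level)

-- ===== LEMMAS AND PROOFS =====

-- loop invariant: after n iterations the state is (2^(n+1) - 1, 2^n)
theorem receptiveField_loop (n : Nat) :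
    (List.range n).foldl (fun (s : Int × Int) (_ : Nat) => (s.1 + 2 * s.2, s.2 * 2)) (1, 1)
      = ((2 : Int) ^ (n + 1) - 1, (2 : Int) ^ n) := by
  induction n with
  | zero => simp
  | succ k ih =>
      rw [List.range_succ, List.foldl_append, ih]
      simp [pow_succ]
      ring

-- ===== VERDICT (by name: the statement is the Claim_ definition above) =====
theorem receptiveField_spec : Claim_equal_receptiveField := by
  intro level _
  unfold Spec_receptiveField receptiveField receptiveField_alt
  rw [PySem.List.pyRange_one]
  simp only [List.foldl_map, Int.sub_zero]
  have h := receptiveField_loop level.toNat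
  simp only [show (3 : Int) - 1 = 2 by norm_num]
  rw [h]
  rcases le_total level 0 with hle | hge
  · simp [Int.toNat_of_nonpos hle, max_eq_right hle]
  · simp [max_eq_left hge]
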